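-- pv_equiv track=rewrite | github.com/Orange-OpenSource/Table-Annotation | preprocessing/prp_scripts/utils.py | transpose_heterogeneous_table
-- ===== SOURCE A (Python) =====
-- def transpose_heterogeneous_table(table):
--     """
--         Transpose a heterogeneous table (rows with possible different widths).
--         We natively padding "" for short lines and perform normal transpose.
--     """
--     table_T = []
--     end_of_tab = False
--     i = 0
--     while not end_of_tab:
--         end_of_tab = True
--         line_T = []
--         for line in table:
--             if i < len(line):
--                 line_T.append(line[i])
--                 end_of_tab = False
--             else:
--                 line_T.append("")
--         i += 1
--         table_T.append(line_T)
--     return table_T[:-1]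
-- ===== SOURCE B (Python) =====
-- def transpose_heterogeneous_table(table):
--     """Transpose a ragged table, padding short rows with ""."""
--     width = max((len(line) for line in table), default=0)
--     return [[line[i] if i < len(line) else "" for line in table]
--             for i in range(width)]
-- ===== Notes on version B (the rewrite author's own statement) =====
-- stated objective: idiomatic
-- what changed: Replaces the sentinel-controlled while loop (which builds one extra all-empty row and discards it with [:-1]) by an up-front max-width pass and a fixed-range comprehension that builds exactly the result.
import Mathlib
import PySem

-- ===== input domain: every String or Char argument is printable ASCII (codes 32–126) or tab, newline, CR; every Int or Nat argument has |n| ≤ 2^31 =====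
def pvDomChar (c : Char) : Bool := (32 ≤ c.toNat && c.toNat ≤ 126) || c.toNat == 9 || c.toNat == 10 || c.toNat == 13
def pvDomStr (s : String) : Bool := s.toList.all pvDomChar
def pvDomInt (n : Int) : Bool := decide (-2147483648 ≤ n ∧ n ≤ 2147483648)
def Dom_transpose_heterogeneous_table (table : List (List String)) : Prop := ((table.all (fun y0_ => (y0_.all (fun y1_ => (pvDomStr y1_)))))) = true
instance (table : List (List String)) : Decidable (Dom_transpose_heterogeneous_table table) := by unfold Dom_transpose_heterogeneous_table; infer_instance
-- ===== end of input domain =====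

-- B replaces A's sentinel-controlled while loop and trailing [:-1] strip by an
-- up-front max-width pass and a fixed-range comprehension (idiomatic; same cost).

-- ===== PORT A =====
-- the maximum row width; used only as A's termination measure and by B
def pvWidth (table : List (List String)) : Nat :=
  table.foldl (fun acc line => Nat.max acc line.length) 0

-- one iteration of A's while-loop body: builds line_T and end_of_tab over `for line in table`
def pvRowA (table : List (List String)) (i : Nat) : List String × Bool :=
  table.foldl
    (fun acc line =>
      if i < line.length then (acc.1 ++ [line.getD i ""], false)
      else (acc.1 ++ [""], acc.2))
    ([], true)

-- characterisation of one loop-body pass (needed for A's termination)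
theorem pvRowA_foldl (i : Nat) :
    ∀ (table : List (List String)) (acc : List String × Bool),
      table.foldl
        (fun acc line =>
          if i < line.length then (acc.1 ++ [line.getD i ""], false)
          else (acc.1 ++ [""], acc.2))
        acc
      = (acc.1 ++ table.map (fun line => if i < line.length then line.getD i "" else ""),
         acc.2 && table.all (fun line => decide (line.length ≤ i))) := by
  intro table
  induction table with
  | nil => intro acc; simp
  | cons l t ih =>
    intro acc
    simp only [List.foldl_cons, List.map_cons, List.all_cons]
    by_cases h : i < l.length
    · rw [if_pos h, ih]
      simp [Nat.not_le.mpr h]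
    · rw [if_neg h, ih]
      simp [Nat.le_of_not_lt (by exact fun hc => h hc)]

theorem pvRowA_eq (table : List (List String)) (i : Nat) :
    pvRowA table i
      = (table.map (fun line => if i < line.length then line.getD i "" else ""),
         table.all (fun line => decide (line.length ≤ i))) := by
  rw [pvRowA, pvRowA_foldl]
  simp

theorem pvWidth_foldl_le {i : Nat} :
    ∀ (t : List (List String)) (a : Nat),
      (List.foldl (fun acc line => Nat.max acc line.length) a t ≤ i)
        ↔ (a ≤ i ∧ ∀ l ∈ t, l.length ≤ i) := by
  intro t
  induction t with
  | nil => simp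
  | cons l t ih =>
    intro a
    simp only [List.foldl_cons, ih, Nat.max_le, List.mem_cons]
    constructor
    · rintro ⟨⟨h1, h2⟩, h3⟩
      refine ⟨h1, ?_⟩
      intro x hx
      rcases hx with rfl | hx
      · exact h2
      · exact h3 x hx
    · rintro ⟨h1, h2⟩
      exact ⟨⟨h1, h2 l (Or.inl rfl)⟩, fun x hx => h2 x (Or.inr hx)⟩

-- A's loop keeps running exactly while i is below the maximum width (termination fact)
theorem pvRowA_snd_false {table : List (List String)} {i : Nat}
    (h : (pvRowA table i).2 = false) : i < pvWidth table := by
  rw [pvRowA_eq] at h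
  by_contra hc
  have hw : pvWidth table ≤ i := Nat.le_of_not_lt hc
  have hall := (pvWidth_foldl_le table 0).mp hw
  have ht : table.all (fun line => decide (line.length ≤ i)) = true := by
    simp only [List.all_eq_true, decide_eq_true_eq]
    exact fun l hl => hall.2 l hl
  rw [ht] at h
  simp at h

-- A's while loop, starting at index i
def pvLoopA (table : List (List String)) (i : Nat) : List (List String) :=
  let r := pvRowA table i
  if h : r.2 = true then [r.1]
  else r.1 :: pvLoopA table (i + 1)
termination_by pvWidth table - i
decreasing_by
  have := pvRowA_snd_false (table := table) (i := i) (by simpa using h)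
  omega

-- A: the while loop from i = 0, then table_T[:-1] (Python xs[:-1] = dropLast, exact)
def transpose_heterogeneous_table (table : List (List String)) : List (List String) :=
  (pvLoopA table 0).dropLast

-- ===== PORT B =====
-- width = max((len(line) for line in table), default=0); then one comprehension over range(width)
def transpose_heterogeneous_table_alt (table : List (List String)) : List (List String) :=
  let width := pvWidth table
  (List.range width).map
    (fun i => table.map (fun line => if i < line.length then line.getD i "" else ""))

-- ===== PRECONDITION & SPEC =====
def Spec_transpose_heterogeneous_table (table : List (List String)) (out : List (List String)) : Prop := out = transpose_heterogeneous_table_alt table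
instance (table : List (List String)) (out : List (List String)) : Decidable (Spec_transpose_heterogeneous_table table out) := by unfold Spec_transpose_heterogeneous_table; infer_instance

-- ===== CLAIM (what is proved, stated in full; the proofs are below) =====
def Claim_equal_transpose_heterogeneous_table : Prop := ∀ (table : List (List String)), Dom_transpose_heterogeneous_table table → Spec_transpose_heterogeneous_table table (transpose_heterogeneous_table table)

-- ===== LEMMAS AND PROOFS =====

theorem pvLoopA_eq (table : List (List String)) :
    ∀ (n i : Nat), pvWidth table - i = n →
      pvLoopA table i
        = (List.range' i (pvWidth table - i)).map
            (fun j => table.map (fun line => if j < line.length then line.getD j "" else ""))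
          ++ [table.map (fun _ => "")] := by
  intro n
  induction n with
  | zero =>
    intro i hn
    have hw : pvWidth table ≤ i := by omega
    have he : (pvRowA table i).2 = true := by
      cases hb : (pvRowA table i).2 with
      | true => rfl
      | false => exact absurd (pvRowA_snd_false hb) (by omega)
    rw [pvLoopA]
    simp only [he, dite_true, hn, List.range'_zero, List.map_nil, List.nil_append]
    rw [pvRowA_eq]
    refine congrArg (fun x => [x]) ?_
    refine List.map_congr_left ?_
    intro l hl
    have : l.length ≤ i := ((pvWidth_foldl_le table 0).mp hw).2 l hl
    simp [Nat.not_lt.mpr this]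
  | succ n ih =>
    intro i hn
    have hi : i < pvWidth table := by omega
    have he : (pvRowA table i).2 = false := by
      have hx : ¬ ∀ l ∈ table, l.length ≤ i := fun hall => by
        have hple : pvWidth table ≤ i := (pvWidth_foldl_le table 0).mpr ⟨Nat.zero_le i, hall⟩
        omega
      push Not at hx
      obtain ⟨l, hl, hli⟩ := hx
      rw [pvRowA_eq]
      simp only [List.all_eq_false]
      exact ⟨l, hl, by simpa using hli⟩
    rw [pvLoopA]
    simp only [he, Bool.false_eq_true, dite_false]
    rw [ih (i + 1) (by omega)]
    have hstep : pvWidth table - i = (pvWidth table - (i + 1)) + 1 := by omega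
    rw [hstep, List.range'_succ, List.map_cons, List.cons_append, pvRowA_eq]

-- ===== VERDICT (by name: the statement is the Claim_ definition above) =====
theorem transpose_heterogeneous_table_spec : Claim_equal_transpose_heterogeneous_table := by
  intro table _
  unfold Spec_transpose_heterogeneous_table transpose_heterogeneous_table
    transpose_heterogeneous_table_alt
  rw [pvLoopA_eq table (pvWidth table - 0) 0 rfl]
  rw [List.dropLast_concat]
  simp [List.range_eq_range']
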